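-- pv_equiv track=rewrite | github.com/FilippoRanza/signal_lib | signal_lib.py | dirac_set
-- ===== SOURCE A (Python) =====
-- def dirac_set(t, p, dt=0):
--     l = len(t)
--     i = 0
--
--     if dt:
--         p = int(p / dt)
--     i = 0
--     out = [0] * l
--     while i < l:
--         out[i] = 1
--         i += p
--
--     return out
-- ===== SOURCE B (Python) =====
-- def dirac_set(t, p, dt=0):
--     if dt:
--         p = int(p / dt)
--     return [1 if i % p == 0 else 0 for i in range(len(t))]
-- ===== Notes on version B (the rewrite author's own statement) =====
-- stated objective: simpler
-- what changed: Replaces the strided while-loop that mutates a preallocated zero array (jumping i += p) with a single full scan over all indices that marks each index by a divisibility test i % p == 0.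
import Mathlib
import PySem

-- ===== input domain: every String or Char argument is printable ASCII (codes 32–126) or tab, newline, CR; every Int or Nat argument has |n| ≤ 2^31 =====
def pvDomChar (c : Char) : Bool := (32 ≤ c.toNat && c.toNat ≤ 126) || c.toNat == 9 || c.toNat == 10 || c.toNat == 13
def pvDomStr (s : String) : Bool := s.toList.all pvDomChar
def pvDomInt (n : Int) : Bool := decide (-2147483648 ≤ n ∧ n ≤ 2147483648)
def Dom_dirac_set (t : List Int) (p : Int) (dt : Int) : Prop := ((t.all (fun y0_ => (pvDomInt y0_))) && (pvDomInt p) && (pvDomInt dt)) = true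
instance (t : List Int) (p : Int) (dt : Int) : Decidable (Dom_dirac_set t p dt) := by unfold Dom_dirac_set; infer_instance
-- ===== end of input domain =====

-- B replaces A's strided mutate-and-jump loop with a single divisibility-test scan over all indices.
-- A mutates no caller data (out is fresh); equivalence is about the return value.

-- ===== PORT A =====
-- out[i] = 1 with Python's negative-index wraparound; exact for -len <= i < len
-- (outside that range Python raises IndexError; Pre_ excludes inputs reaching it).
def pySetOne (xs : List Int) (i : Int) : List Int :=
  let j : Int := if i < 0 then i + xs.length else i
  if _h : 0 ≤ j ∧ j < xs.length then xs.set j.toNat 1 else xs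

-- the while-loop, with fuel (length+1 suffices on Pre_, where the step q is positive)
def diracLoop (out : List Int) (i l q : Int) : Nat → List Int
  | 0 => out
  | fuel+1 => if i < l then diracLoop (pySetOne out i) (i + q) l q fuel else out

def dirac_set (t : List Int) (p : Int) (dt : Int) : List Int :=
  let l : Int := t.length
  -- int(p / dt): PySem.Int.truncdiv is exact for |p|,|dt| < 2^53, which Dom_ guarantees
  let q : Int := if dt ≠ 0 then PySem.Int.truncdiv p dt else p
  diracLoop (List.replicate t.length 0) 0 l q (t.length + 1)

-- ===== PORT B =====
def dirac_set_alt (t : List Int) (p : Int) (dt : Int) : List Int :=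
  let q : Int := if dt ≠ 0 then PySem.Int.truncdiv p dt else p
  (List.range t.length).map (fun i : Nat => if PySem.Int.mod (i : Int) q = 0 then (1 : Int) else 0)

-- ===== PRECONDITION & SPEC =====
-- Pre_ excludes nonempty t with non-positive effective period: there A never returns
-- (q = 0 loops forever; q < 0 raises IndexError after negative-index wraparound).
def Pre_dirac_set (t : List Int) (p : Int) (dt : Int) : Prop :=
  t = [] ∨ 0 < (if dt ≠ 0 then PySem.Int.truncdiv p dt else p)
instance (t : List Int) (p : Int) (dt : Int) : Decidable (Pre_dirac_set t p dt) := by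
  unfold Pre_dirac_set; infer_instance
def pvWitness_dirac_set : List Int × Int × Int := ([5, 6, 7, 8, 9], 2, 0)

def Spec_dirac_set (t : List Int) (p : Int) (dt : Int) (out : List Int) : Prop := out = dirac_set_alt t p dt
instance (t : List Int) (p : Int) (dt : Int) (out : List Int) : Decidable (Spec_dirac_set t p dt out) := by unfold Spec_dirac_set; infer_instance

-- ===== CLAIM (what is proved, stated in full; the proofs are below) =====
def Claim_equal_dirac_set : Prop := ∀ (t : List Int) (p : Int) (dt : Int), Dom_dirac_set t p dt → Pre_dirac_set t p dt → Spec_dirac_set t p dt (dirac_set t p dt)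
-- ===== LEMMAS AND PROOFS =====

lemma pySetOne_length (xs : List Int) (i : Int) : (pySetOne xs i).length = xs.length := by
  unfold pySetOne; dsimp only; split <;> split <;> simp

lemma pySetOne_get? (xs : List Int) (i : Int) (h0 : 0 ≤ i) (h1 : i < xs.length)
    (j : Nat) (hj : j < xs.length) :
    (pySetOne xs i)[j]? = some (if (j : Int) = i then 1 else xs[j]) := by
  unfold pySetOne
  have hni : ¬ i < 0 := by omega
  simp only [hni, if_false]
  rw [dif_pos ⟨h0, h1⟩]
  rw [List.getElem?_set]
  have hiff : (i.toNat = j) ↔ ((j : Int) = i) := by omega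
  by_cases hc : (j : Int) = i
  · simp [hc, hiff, show i.toNat < xs.length by omega]
  · have : ¬ (i.toNat = j) := by omega
    simp [this, hc, List.getElem?_eq_getElem hj]

lemma pySetOne_getElem (xs : List Int) (i : Int) (h0 : 0 ≤ i) (h1 : i < (xs.length : Int))
    (j : Nat) (hj : j < xs.length) (hj' : j < (pySetOne xs i).length) :
    (pySetOne xs i)[j] = if (j : Int) = i then 1 else xs[j] := by
  apply Option.some.inj
  rw [← List.getElem?_eq_getElem hj']
  exact pySetOne_get? xs i h0 h1 j hj

lemma diracLoop_get? (q : Int) (hq : 0 < q) :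
    ∀ (fuel : Nat) (out : List Int) (i : Int), 0 ≤ i →
      (out.length : Int) ≤ i + fuel * q →
      ∀ (j : Nat) (hj : j < out.length),
        (diracLoop out i out.length q fuel)[j]? =
          some (if i ≤ (j : Int) ∧ q ∣ ((j : Int) - i) then 1 else out[j]) := by
  intro fuel
  induction fuel with
  | zero =>
    intro out i h0 hb j hj
    have hcond : ¬ (i ≤ (j : Int) ∧ q ∣ ((j : Int) - i)) := by
      simp at hb; rintro ⟨h1, -⟩; omega
    simp [diracLoop, hcond, List.getElem?_eq_getElem hj]
  | succ fuel ih =>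
    intro out i h0 hb j hj
    unfold diracLoop
    by_cases hil : i < (out.length : Int)
    · rw [if_pos hil]
      have hlen : (pySetOne out i).length = out.length := pySetOne_length out i
      have hb' : ((pySetOne out i).length : Int) ≤ (i + q) + fuel * q := by
        rw [hlen]; push_cast at hb ⊢; nlinarith
      have := ih (pySetOne out i) (i + q) (by omega) hb' j (by omega)
      simp only [hlen] at this
      rw [this, pySetOne_getElem out i h0 hil j hj (by rw [pySetOne_length]; exact hj)]
      congr 1
      by_cases hji : (j : Int) = i
      · have h1 : i ≤ (j : Int) ∧ q ∣ ((j : Int) - i) := ⟨by omega, by rw [hji]; simp⟩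
        have h2 : ¬ (i + q ≤ (j : Int)) := by omega
        simp [hji]
      · by_cases hd : q ∣ ((j : Int) - i)
        · by_cases hle : i ≤ (j : Int)
          · -- j > i divisible: j - i ≥ q
            have hpos : 0 < (j : Int) - i := by omega
            have hge : q ≤ (j : Int) - i := Int.le_of_dvd hpos hd
            have hd' : q ∣ ((j : Int) - (i + q)) := by
              have : (j : Int) - (i + q) = ((j : Int) - i) - q := by ring
              rw [this]; exact dvd_sub hd dvd_rfl
            simp [hle, hd, hd', show i + q ≤ (j : Int) by omega]
          · have h2 : ¬ (i + q ≤ (j : Int)) := by omega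
            simp [hle, h2, hji]
        · have hd' : ¬ q ∣ ((j : Int) - (i + q)) := by
            intro h
            apply hd
            have : (j : Int) - i = ((j : Int) - (i + q)) + q := by ring
            rw [this]; exact dvd_add h dvd_rfl
          simp [hd, hd', hji]
    · rw [if_neg hil]
      have hcond : ¬ (i ≤ (j : Int) ∧ q ∣ ((j : Int) - i)) := by intro h; omega
      simp [hcond, List.getElem?_eq_getElem hj]

lemma diracLoop_length (fuel : Nat) : ∀ (out : List Int) (i l q : Int),
    (diracLoop out i l q fuel).length = out.length := by
  induction fuel with
  | zero => intro out i l q; rfl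
  | succ f ih =>
    intro out i l q
    unfold diracLoop
    split
    · rw [ih, pySetOne_length]
    · rfl

lemma dirac_eq_of_pos (t : List Int) (q : Int) (hq : 0 < q) :
    diracLoop (List.replicate t.length 0) 0 (t.length : Int) q (t.length + 1) =
      (List.range t.length).map (fun i : Nat => if PySem.Int.mod (i : Int) q = 0 then (1 : Int) else 0) := by
  apply List.ext_getElem?
  intro j
  have hlen0 : (List.replicate t.length (0 : Int)).length = t.length := by simp
  by_cases hj : j < t.length
  · have hb : ((List.replicate t.length (0 : Int)).length : Int) ≤ 0 + (t.length + 1) * q := by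
      rw [hlen0]; nlinarith
    have := diracLoop_get? q hq (t.length + 1) (List.replicate t.length 0) 0 le_rfl hb j
      (by omega)
    simp only [hlen0] at this
    rw [this]
    simp only [List.getElem?_map, List.getElem?_range hj, List.getElem_replicate]
    have hmod := PySem.Int.mod_eq_zero_iff_dvd ((j : Int)) q
    by_cases hd : q ∣ (j : Int)
    · simp [hd, hmod.mpr hd, show (0:Int) ≤ (j:Int) by omega]
    · have hne : ¬ PySem.Int.mod (j : Int) q = 0 := fun h => hd (hmod.mp h)
      simp [hd, hne]
  · have h1 : (diracLoop (List.replicate t.length 0) 0 (t.length : Int) q (t.length + 1)).length = t.length := by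
      rw [diracLoop_length, hlen0]
    rw [List.getElem?_eq_none (by omega), List.getElem?_eq_none (by simp; omega)]

-- ===== VERDICT (by name: the statement is the Claim_ definition above) =====
theorem dirac_set_spec : Claim_equal_dirac_set := by
  intro t p dt _hdom hpre
  unfold Spec_dirac_set dirac_set dirac_set_alt
  dsimp only
  rcases hpre with h | hq
  · subst h; simp [diracLoop]
  · exact dirac_eq_of_pos t _ hq
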